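-- pv_equiv track=rewrite | github.com/vp655/VotingSystems | votingsystemsmain.py | obtain_combos
-- ===== SOURCE A (Python) =====
-- def obtain_combos(unique_perms):
--     list_of_combos = []
--     for val in unique_perms:
--         count = 0
--         val_to_add = []
--         for i in range(0, len(val)):
--             if (val[i] == 0):
--                 count = count + 1
--             if (val[i] == 1):
--                 val_to_add.append(count)
--                 count = 0
--             if (i + 1 == len(val)):
--                 val_to_add.append(count)
--         list_of_combos.append(val_to_add)
--     return list_of_combos
-- ===== SOURCE B (Python) =====
-- def obtain_combos(unique_perms):
--     result = []
--     for val in unique_perms: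
--         ones = [i for i, x in enumerate(val) if x == 1]
--         segs = []
--         prev = -1
--         for j in ones:
--             segs.append(sum(1 for x in val[prev + 1:j] if x == 0))
--             prev = j
--         if val:
--             segs.append(sum(1 for x in val[prev + 1:] if x == 0))
--         result.append(segs)
--     return result
-- ===== Notes on version B (the rewrite author's own statement) =====
-- stated objective: alternative
-- what changed: A fuses counting and grouping in one stateful pass with an end-of-list flag; B first indexes the positions of the 1s, then counts the zeros in each slice between consecutive 1-positions (plus the trailing slice for non-empty sequences).
import Mathlib
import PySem

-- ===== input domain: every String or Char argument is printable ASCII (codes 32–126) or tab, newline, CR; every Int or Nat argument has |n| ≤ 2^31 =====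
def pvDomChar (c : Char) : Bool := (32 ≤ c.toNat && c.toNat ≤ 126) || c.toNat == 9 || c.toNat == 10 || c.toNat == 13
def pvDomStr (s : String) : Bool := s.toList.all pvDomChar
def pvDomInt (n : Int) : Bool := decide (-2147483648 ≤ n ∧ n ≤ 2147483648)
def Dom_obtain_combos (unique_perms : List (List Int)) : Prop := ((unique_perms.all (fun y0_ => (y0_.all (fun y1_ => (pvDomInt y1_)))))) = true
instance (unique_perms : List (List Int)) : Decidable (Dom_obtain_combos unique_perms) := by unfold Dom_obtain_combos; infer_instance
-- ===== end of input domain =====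

-- B replaces A's fused counting pass by a two-phase scheme (index the positions of the 1s, then
-- count the zeros in each slice between consecutive 1-positions); same results, alternative algorithm.

-- ===== PORT A =====
-- inner loop of A: state (count, val_to_add); the `i + 1 == len(val)` test is `rest = []`
def pvLoopA : List Int → Int → List Int → List Int
  | [], _count, acc => acc
  | x :: rest, count, acc =>
    let count := if x == 0 then count + 1 else count
    let st := if x == 1 then ((0 : Int), acc ++ [count]) else (count, acc)
    match rest with
    | [] => st.2 ++ [st.1]
    | _ :: _ => pvLoopA rest st.1 st.2

def obtain_combos (unique_perms : List (List Int)) : List (List Int) :=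
  unique_perms.foldl (fun list_of_combos val => list_of_combos ++ [pvLoopA val 0 []]) []

-- ===== PORT B =====
-- sum(1 for x in seg if x == 0)
def pvZC (xs : List Int) : Int := ((xs.filter (fun x => x == 0)).length : Int)

-- [i for i, x in enumerate(val) if x == 1]
def pvOnes (val : List Int) : List Int :=
  ((PySem.List.enumerate val 0).filter (fun p => p.2 == 1)).map (fun p => p.1)

-- body of B's loop over the 1-positions: state (prev, segs)
def pvStep (val : List Int) (st : Int × List Int) (j : Int) : Int × List Int :=
  (j, st.2 ++ [pvZC (PySem.List.slice val (some (st.1 + 1)) (some j))])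

def pvInnerB (val : List Int) : List Int :=
  let st := (pvOnes val).foldl (pvStep val) (-1, [])
  if val ≠ [] then st.2 ++ [pvZC (PySem.List.slice val (some (st.1 + 1)) none)] else st.2

def obtain_combos_alt (unique_perms : List (List Int)) : List (List Int) :=
  unique_perms.foldl (fun result val => result ++ [pvInnerB val]) []

-- ===== PRECONDITION & SPEC =====
def Spec_obtain_combos (unique_perms : List (List Int)) (out : List (List Int)) : Prop := out = obtain_combos_alt unique_perms
instance (unique_perms : List (List Int)) (out : List (List Int)) : Decidable (Spec_obtain_combos unique_perms out) := by unfold Spec_obtain_combos; infer_instance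

-- ===== CLAIM (what is proved, stated in full; the proofs are below) =====
def Claim_equal_obtain_combos : Prop := ∀ (unique_perms : List (List Int)), Dom_obtain_combos unique_perms → Spec_obtain_combos unique_perms (obtain_combos unique_perms)

-- ===== LEMMAS AND PROOFS =====

-- proof midpoint: the segments of val delimited by its 1s
def pvSegs : List Int → List (List Int)
  | [] => [[]]
  | x :: xs =>
    if x = 1 then [] :: pvSegs xs
    else match pvSegs xs with
      | s :: ss => (x :: s) :: ss
      | [] => [[x]]

lemma pvSegs_ne_nil (v : List Int) : pvSegs v ≠ [] := by
  cases v with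
  | nil => simp [pvSegs]
  | cons x xs =>
    simp only [pvSegs]
    split_ifs
    · simp
    · rcases h : pvSegs xs with _ | ⟨s, ss⟩ <;> simp

lemma pvSegs_cons_one (xs : List Int) : pvSegs ((1 : Int) :: xs) = [] :: pvSegs xs := by
  simp [pvSegs]

lemma pvSegs_cons_ne (x : Int) (xs : List Int) (hx : x ≠ 1) :
    pvSegs (x :: xs) = match pvSegs xs with | s :: ss => (x :: s) :: ss | [] => [[x]] := by
  simp [pvSegs, hx]

lemma pvZC_nil : pvZC [] = 0 := by simp [pvZC]

lemma pvZC_cons (x : Int) (s : List Int) :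
    pvZC (x :: s) = (if x = 0 then 1 else 0) + pvZC s := by
  by_cases hx : x = 0 <;> simp [pvZC, hx] <;> omega

-- A's inner loop result via segments
def pvMapZC (c : Int) : List (List Int) → List Int
  | [] => []
  | s :: ss => (c + pvZC s) :: ss.map pvZC

lemma loopA_segs : ∀ (v : List Int) (count : Int) (acc : List Int), v ≠ [] →
    pvLoopA v count acc = acc ++ pvMapZC count (pvSegs v) := by
  intro v
  induction v with
  | nil => intro _ _ h; exact absurd rfl h
  | cons x rest ih =>
    intro count acc _
    cases rest with
    | nil =>
      rcases eq_or_ne x 1 with hx1 | hx1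
      · subst hx1
        simp [pvLoopA, pvSegs, pvMapZC, pvZC_nil]
      · rcases eq_or_ne x 0 with hx0 | hx0
        · subst hx0
          simp [pvLoopA, pvSegs, pvMapZC, pvZC_cons, pvZC_nil]
        · simp [pvLoopA, pvSegs, pvMapZC, pvZC_cons, pvZC_nil, hx1, hx0]
    | cons y ys =>
      rcases h : pvSegs (y :: ys) with _ | ⟨s, ss⟩
      · exact absurd h (pvSegs_ne_nil _)
      rcases eq_or_ne x 1 with hx1 | hx1
      · subst hx1
        have : pvLoopA (1 :: y :: ys) count acc = pvLoopA (y :: ys) 0 (acc ++ [count]) := by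
          simp [pvLoopA]
        rw [this, ih 0 (acc ++ [count]) (by simp)]
        rw [pvSegs_cons_one, h]
        simp [pvMapZC, pvZC_nil]
      · rcases eq_or_ne x 0 with hx0 | hx0
        · subst hx0
          have : pvLoopA (0 :: y :: ys) count acc = pvLoopA (y :: ys) (count + 1) acc := by
            simp [pvLoopA]
          rw [this, ih (count + 1) acc (by simp)]
          rw [pvSegs_cons_ne 0 _ (by norm_num), h]
          simp [pvMapZC, pvZC_cons]
          omega
        · have : pvLoopA (x :: y :: ys) count acc = pvLoopA (y :: ys) count acc := by
            simp [pvLoopA, hx1, hx0]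
          rw [this, ih count acc (by simp)]
          rw [pvSegs_cons_ne x _ hx1, h]
          simp [pvMapZC, pvZC_cons, hx0]

-- B side lemmas
lemma ones_aux : ∀ (v : List Int) (s : Int),
    ((PySem.List.enumerate v (s + 1)).filter (fun p => p.2 == 1)).map (fun p => p.1)
      = (((PySem.List.enumerate v s).filter (fun p => p.2 == 1)).map (fun p => p.1)).map (· + 1) := by
  intro v
  induction v with
  | nil => intro s; simp [PySem.List.enumerate_nil]
  | cons x xs ih =>
    intro s
    by_cases hx : (x == 1) = true <;>
      simp [PySem.List.enumerate_cons, List.filter_cons, hx, ih (s + 1), ih s]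

lemma ones_cons (x : Int) (v : List Int) :
    pvOnes (x :: v) = (if x = 1 then [(0 : Int)] else []) ++ (pvOnes v).map (· + 1) := by
  have h := ones_aux v 0
  norm_num at h
  unfold pvOnes
  rw [PySem.List.enumerate_cons]
  by_cases hx : x = 1 <;>
    simp [List.filter_cons, hx, h]

lemma ones_nonneg (v : List Int) : ∀ j ∈ pvOnes v, 0 ≤ j := by
  intro j hj
  simp only [pvOnes, List.mem_map, List.mem_filter] at hj
  obtain ⟨p, ⟨hp, -⟩, rfl⟩ := hj
  rw [PySem.List.mem_enumerate_iff] at hp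
  obtain ⟨k, hk, rfl⟩ := hp
  simp

lemma fold_prefix : ∀ (l : List Int) (v : List Int) (p : Int) (segs : List Int),
    l.foldl (pvStep v) (p, segs) =
      ((l.foldl (pvStep v) (p, [])).1, segs ++ (l.foldl (pvStep v) (p, [])).2) := by
  intro l
  induction l with
  | nil => intro v p segs; simp
  | cons j l ih =>
    intro v p segs
    simp only [List.foldl_cons, pvStep]
    rw [ih v j, ih v j (List.nil ++ _)]
    simp

lemma fold_fst_ge : ∀ (l : List Int) (v : List Int) (p : Int) (segs : List Int),
    -1 ≤ p → (∀ j ∈ l, 0 ≤ j) → -1 ≤ (l.foldl (pvStep v) (p, segs)).1 := by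
  intro l
  induction l with
  | nil => intro v p segs hp _; exact hp
  | cons j l ih =>
    intro v p segs hp hl
    simp only [List.foldl_cons, pvStep]
    exact ih v j _ (by have := hl j (by simp); omega) (fun i hi => hl i (by simp [hi]))

lemma slice_cons_shift (x : Int) (v : List Int) (a b : Int) (ha : 0 ≤ a) (hb : 0 ≤ b) :
    PySem.List.slice (x :: v) (some (a + 1)) (some (b + 1)) = PySem.List.slice v (some a) (some b) := by
  rw [PySem.List.slice_toNat _ (by omega) (by omega), PySem.List.slice_toNat _ ha hb]
  have h1 : (a + 1).toNat = a.toNat + 1 := by omega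
  have h2 : (b + 1).toNat = b.toNat + 1 := by omega
  rw [h1, h2]
  simp only [List.drop_succ_cons]
  congr 1
  omega

lemma slice_from_cons_shift (x : Int) (v : List Int) (a : Int) (ha : 0 ≤ a) :
    PySem.List.slice (x :: v) (some (a + 1)) none = PySem.List.slice v (some a) none := by
  rw [PySem.List.slice_from _ (by omega), PySem.List.slice_from _ ha]
  have h1 : (a + 1).toNat = a.toNat + 1 := by omega
  rw [h1]
  simp [List.drop_succ_cons]

lemma slice_cons_head (x : Int) (v : List Int) (b : Int) (hb : 0 ≤ b) :
    PySem.List.slice (x :: v) (some 0) (some (b + 1)) = x :: PySem.List.slice v (some 0) (some b) := by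
  rw [PySem.List.slice_toNat _ (by omega) (by omega), PySem.List.slice_toNat _ (by omega) hb]
  have h2 : (b + 1).toNat = b.toNat + 1 := by omega
  rw [h2]
  simp [List.take_succ_cons]

lemma fold_shift : ∀ (l : List Int) (x : Int) (v : List Int) (p : Int) (segs : List Int),
    -1 ≤ p → (∀ j ∈ l, 0 ≤ j) →
    (l.map (· + 1)).foldl (pvStep (x :: v)) (p + 1, segs) =
      ((l.foldl (pvStep v) (p, segs)).1 + 1, (l.foldl (pvStep v) (p, segs)).2) := by
  intro l
  induction l with
  | nil => intro x v p segs hp _; simp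
  | cons j l ih =>
    intro x v p segs hp hl
    have hj : (0 : Int) ≤ j := hl j (by simp)
    simp only [List.map_cons, List.foldl_cons, pvStep]
    rw [slice_cons_shift x v (p + 1) j (by omega) hj]
    exact ih x v j _ (by omega) (fun i hi => hl i (by simp [hi]))

lemma innerB_segs : ∀ (v : List Int), v ≠ [] → pvInnerB v = (pvSegs v).map pvZC := by
  intro v
  induction v with
  | nil => intro h; exact absurd rfl h
  | cons x xs ih =>
    intro _
    rcases eq_or_ne x 1 with hx1 | hx1
    · -- x = 1
      subst hx1
      have hones : pvOnes ((1 : Int) :: xs) = 0 :: (pvOnes xs).map (· + 1) := by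
        rw [ones_cons]; simp
      have hslice0 : pvZC (PySem.List.slice ((1 : Int) :: xs) (some (-1 + 1)) (some 0)) = 0 := by
        rw [show ((-1 : Int) + 1) = 0 by ring, PySem.List.slice_toNat _ (by omega) (by omega)]
        simp [pvZC_nil]
      have hF := fold_prefix (pvOnes xs) xs (-1)
      set F := (pvOnes xs).foldl (pvStep xs) (-1, []) with hFdef
      have hfst : -1 ≤ F.1 := fold_fst_ge _ _ _ _ (by omega) (ones_nonneg xs)
      have hmain : pvInnerB ((1 : Int) :: xs)
          = 0 :: (F.2 ++ [pvZC (PySem.List.slice xs (some (F.1 + 1)) none)]) := by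
        unfold pvInnerB
        rw [hones]
        simp only [List.foldl_cons, pvStep, hslice0, List.nil_append]
        have hfs := fold_shift (pvOnes xs) 1 xs (-1) [0] (by omega) (ones_nonneg xs)
        norm_num at hfs
        rw [hfs, hF [0]]
        simp only [ne_eq, reduceCtorEq, not_false_iff, if_true, List.nil_append]
        rw [slice_from_cons_shift 1 xs (F.1 + 1) (by omega)]
        simp
      rcases eq_or_ne xs [] with hxs | hxs
      · subst hxs
        simp only [hmain]
        simp [pvInnerB, pvOnes, PySem.List.enumerate_nil, pvSegs, pvZC_nil, F,
          PySem.List.slice_from (α := Int) ([]) (a := (-1 : Int) + 1) (by omega)]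
      · have hB : pvInnerB xs = F.2 ++ [pvZC (PySem.List.slice xs (some (F.1 + 1)) none)] := by
          unfold pvInnerB
          rw [← hFdef]
          simp [hxs]
        rw [hmain, ← hB, ih hxs]
        rw [pvSegs_cons_one]
        simp [pvZC_nil]
    · -- x ≠ 1
      have hones : pvOnes (x :: xs) = (pvOnes xs).map (· + 1) := by
        rw [ones_cons]; simp [hx1]
      rcases h0 : pvOnes xs with _ | ⟨j, l⟩
      · -- no ones at all
        have hmain : pvInnerB (x :: xs) = [pvZC (x :: xs)] := by
          unfold pvInnerB
          rw [hones, h0]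
          simp only [List.map_nil, List.foldl_nil, ne_eq, reduceCtorEq, not_false_iff, if_true]
          rw [show ((-1 : Int) + 1) = 0 by ring, PySem.List.slice_from _ (by omega)]
          simp
        rcases eq_or_ne xs [] with hxs | hxs
        · subst hxs
          rw [hmain]
          simp [pvSegs, hx1, pvZC_cons, pvZC_nil]
        · have hBxs : pvInnerB xs = [pvZC xs] := by
            unfold pvInnerB
            rw [h0]
            simp only [List.foldl_nil, ne_eq, hxs, not_false_iff, if_true]
            rw [show ((-1 : Int) + 1) = 0 by ring, PySem.List.slice_from _ (by omega)]
            simp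
          rcases hseg : pvSegs xs with _ | ⟨s, ss⟩
          · exact absurd hseg (pvSegs_ne_nil _)
          have hzc := ih hxs
          rw [hBxs, hseg] at hzc
          simp only [List.map_cons] at hzc
          have hs : pvZC xs = pvZC s := (List.cons.injEq _ _ _ _).mp hzc |>.1
          have hss : ss.map pvZC = [] := ((List.cons.injEq _ _ _ _).mp hzc |>.2).symm
          rw [hmain]
          simp [pvSegs, hx1, hseg, pvZC_cons, hs, ← hss]
      · -- at least one 1 in xs
        have hxs : xs ≠ [] := by
          intro h; rw [h] at h0; simp [pvOnes, PySem.List.enumerate_nil] at h0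
        have hj : (0 : Int) ≤ j := ones_nonneg xs j (by rw [h0]; simp)
        have hl : ∀ i ∈ l, (0 : Int) ≤ i := fun i hi => ones_nonneg xs i (by rw [h0]; simp [hi])
        have hH := fold_prefix l xs j
        set H := l.foldl (pvStep xs) (j, []) with hHdef
        have hHfst : -1 ≤ H.1 := fold_fst_ge _ _ _ _ (by omega) hl
        set c0 := pvZC (PySem.List.slice xs (some 0) (some j)) with hc0
        set d : Int := if x = 0 then 1 else 0 with hd
        have hheadslice : pvZC (PySem.List.slice (x :: xs) (some (-1 + 1)) (some (j + 1))) = d + c0 := by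
          rw [show ((-1 : Int) + 1) = 0 by ring, slice_cons_head x xs j hj, pvZC_cons]
        have hmain : pvInnerB (x :: xs)
            = (d + c0) :: (H.2 ++ [pvZC (PySem.List.slice xs (some (H.1 + 1)) none)]) := by
          unfold pvInnerB
          rw [hones, h0]
          simp only [List.map_cons, List.foldl_cons, pvStep, hheadslice, List.nil_append]
          rw [fold_shift l x xs j [d + c0] (by omega) hl]
          rw [hH [d + c0]]
          simp only [ne_eq, reduceCtorEq, not_false_iff, if_true, List.nil_append]
          rw [slice_from_cons_shift x xs (H.1 + 1) (by omega)]
          simp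
        have hBxs : pvInnerB xs = c0 :: (H.2 ++ [pvZC (PySem.List.slice xs (some (H.1 + 1)) none)]) := by
          unfold pvInnerB
          rw [h0]
          simp only [List.foldl_cons, pvStep, List.nil_append]
          rw [show ((-1 : Int) + 1) = 0 by ring, ← hc0]
          rw [hH [c0]]
          simp [hxs]
        rcases hseg : pvSegs xs with _ | ⟨s, ss⟩
        · exact absurd hseg (pvSegs_ne_nil _)
        have hzc := ih hxs
        rw [hBxs, hseg] at hzc
        simp only [List.map_cons] at hzc
        have hs : c0 = pvZC s := (List.cons.injEq _ _ _ _).mp hzc |>.1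
        have hss : H.2 ++ [pvZC (PySem.List.slice xs (some (H.1 + 1)) none)] = ss.map pvZC :=
          (List.cons.injEq _ _ _ _).mp hzc |>.2
        rw [hmain, hs, hss]
        simp [pvSegs, hx1, hseg, pvZC_cons, hd]

lemma inner_eq (v : List Int) : pvLoopA v 0 [] = pvInnerB v := by
  rcases eq_or_ne v [] with h | h
  · subst h; simp [pvLoopA, pvInnerB, pvOnes, PySem.List.enumerate_nil]
  · rw [loopA_segs v 0 [] h, innerB_segs v h]
    rcases hseg : pvSegs v with _ | ⟨s, ss⟩
    · exact absurd hseg (pvSegs_ne_nil _)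
    simp [pvMapZC]

-- ===== VERDICT (by name: the statement is the Claim_ definition above) =====
theorem obtain_combos_spec : Claim_equal_obtain_combos := by
  intro ups _
  unfold Spec_obtain_combos obtain_combos obtain_combos_alt
  rw [PySem.List.foldl_append_singleton_eq_map, PySem.List.foldl_append_singleton_eq_map]
  exact List.map_congr_left (fun v _ => inner_eq v)
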